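-- pv_equiv track=rewrite | github.com/Rajesh1215/raj-vid-processings | tests/test_keyframes_direct.py | create_line_groups
-- ===== SOURCE A (Python) =====
-- from typing import Dict, List, Any, Tuple
--
-- def create_line_groups(words: List[Dict], max_lines: int = 2) -> List[List[List[Dict]]]:
--     """Create line groups where each word group becomes a line"""
--     if not words:
--         return []
--
--     # Simple implementation: group words by line capacity
--     words_per_line = max(1, len(words) // max_lines)
--
--     line_groups = []
--     current_group = []
--     current_line = []
--
--     for i, word in enumerate(words):
--         current_line.append(word)
--
--         # If line is full or end of words
--         if len(current_line) >= words_per_line or i == len(words) - 1: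
--             current_group.append(current_line)
--             current_line = []
--
--             # If group has enough lines
--             if len(current_group) >= max_lines or i == len(words) - 1:
--                 line_groups.append(current_group)
--                 current_group = []
--
--     return line_groups
-- ===== SOURCE B (Python) =====
-- from typing import Dict, List
--
-- def create_line_groups(words: List[Dict], max_lines: int = 2) -> List[List[List[Dict]]]:
--     """Create line groups where each word group becomes a line"""
--     if not words:
--         return []
--     words_per_line = max(1, len(words) // max_lines)
--
--     def chunk(xs, k):
--         # split xs into consecutive pieces of size k (last piece may be shorter)
--         out = []
--         while xs:
--             out.append(xs[:k])
--             xs = xs[k:]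
--         return out
--
--     lines = chunk(words, words_per_line)
--     return chunk(lines, max(1, max_lines))
-- ===== Notes on version B (the rewrite author's own statement) =====
-- stated objective: simpler
-- what changed: Replaces A's fused single-pass loop with dual line/group accumulator buffers and index-based end-of-input tests by two independent recursive chunking passes (split words into lines of size words_per_line, then split the lines into groups of size max(1, max_lines)).
import Mathlib
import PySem

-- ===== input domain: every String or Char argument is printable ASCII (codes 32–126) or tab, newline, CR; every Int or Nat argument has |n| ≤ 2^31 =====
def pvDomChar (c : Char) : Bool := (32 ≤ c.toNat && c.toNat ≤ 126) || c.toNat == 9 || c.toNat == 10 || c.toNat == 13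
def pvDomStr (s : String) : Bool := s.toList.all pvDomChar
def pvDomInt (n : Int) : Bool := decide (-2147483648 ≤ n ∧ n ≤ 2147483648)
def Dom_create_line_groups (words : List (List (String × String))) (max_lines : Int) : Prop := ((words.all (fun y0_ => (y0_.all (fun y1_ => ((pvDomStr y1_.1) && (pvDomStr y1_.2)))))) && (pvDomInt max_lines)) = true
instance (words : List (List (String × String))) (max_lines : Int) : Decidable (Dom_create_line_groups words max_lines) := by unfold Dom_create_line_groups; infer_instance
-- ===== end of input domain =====

-- B replaces A's fused stateful single-pass loop by two independent recursive chunking passes (simpler decomposition; same cost).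

-- ===== PORT A =====
-- the loop body of A (state = (line_groups, current_group, current_line), input = (i, word))
def pvStepA (nI wplI ml : Int)
    (st : List (List (List (List (String × String)))) × List (List (List (String × String))) × List (List (String × String)))
    (iw : Int × List (String × String)) :
    List (List (List (List (String × String)))) × List (List (List (String × String))) × List (List (String × String)) :=
  let cl' := st.2.2 ++ [iw.2]
  if ((cl'.length : Int) ≥ wplI) ∨ (iw.1 = nI - 1) then
    let cg' := st.2.1 ++ [cl']
    if ((cg'.length : Int) ≥ ml) ∨ (iw.1 = nI - 1) then (st.1 ++ [cg'], [], [])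
    else (st.1, cg', [])
  else (st.1, st.2.1, cl')

def create_line_groups (words : List (List (String × String))) (max_lines : Int) : List (List (List (List (String × String)))) :=
  if words = [] then []
  else
    let words_per_line : Int := max 1 (PySem.Int.floordiv (words.length : Int) max_lines)
    ((PySem.List.enumerate words 0).foldl (pvStepA (words.length : Int) words_per_line max_lines) ([], [], [])).1

-- ===== PORT B =====
-- chunk(xs, k): out = []; while xs: out.append(xs[:k]); xs = xs[k:]; return out.
-- Exact for k ≥ 1 (the only call sites): on nonempty xs, xs[:k] = head :: (tail take (k-1)), xs[k:] = tail drop (k-1)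
def pvChunkIter {T : Type} (k : Int) : List T → List (List T) → List (List T)
  | [], out => out
  | x :: xs, out => pvChunkIter k (xs.drop (k.toNat - 1)) (out ++ [x :: xs.take (k.toNat - 1)])
termination_by ys _ => ys.length
decreasing_by simp [List.length_drop]

def create_line_groups_alt (words : List (List (String × String))) (max_lines : Int) : List (List (List (List (String × String)))) :=
  if words = [] then []
  else
    let words_per_line : Int := max 1 (PySem.Int.floordiv (words.length : Int) max_lines)
    let lines := pvChunkIter words_per_line words []
    pvChunkIter (max 1 max_lines) lines []

-- ===== PRECONDITION & SPEC =====
-- Pre_ excludes only inputs where the Python raises: for nonempty words and max_lines = 0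
-- both A and B raise ZeroDivisionError at 'len(words) // max_lines'.
def Pre_create_line_groups (words : List (List (String × String))) (max_lines : Int) : Prop :=
  words = [] ∨ max_lines ≠ 0
instance (words : List (List (String × String))) (max_lines : Int) : Decidable (Pre_create_line_groups words max_lines) := by unfold Pre_create_line_groups; infer_instance
def pvWitness_create_line_groups : (List (List (String × String))) × Int := ([[("a", "b")], [("c", "d")]], 2)

def Spec_create_line_groups (words : List (List (String × String))) (max_lines : Int) (out : List (List (List (List (String × String))))) : Prop := out = create_line_groups_alt words max_lines
instance (words : List (List (String × String))) (max_lines : Int) (out : List (List (List (List (String × String))))) : Decidable (Spec_create_line_groups words max_lines out) := by unfold Spec_create_line_groups; infer_instance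

-- ===== CLAIM (what is proved, stated in full; the proofs are below) =====
def Claim_equal_create_line_groups : Prop := ∀ (words : List (List (String × String))) (max_lines : Int), Dom_create_line_groups words max_lines → Pre_create_line_groups words max_lines → Spec_create_line_groups words max_lines (create_line_groups words max_lines)

-- ===== LEMMAS AND PROOFS =====

-- recursive (non-accumulator) form of B's chunking loop
def pvChunkB {T : Type} (k : Int) : List T → List (List T)
  | [] => []
  | x :: xs => (x :: xs.take (k.toNat - 1)) :: pvChunkB k (xs.drop (k.toNat - 1))
termination_by ys => ys.length
decreasing_by simp [List.length_drop]

lemma pvChunkIter_eq (T : Type) (k : Int) :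
    ∀ (n : Nat) (xs : List T), xs.length ≤ n →
      ∀ (out : List (List T)), pvChunkIter k xs out = out ++ pvChunkB k xs := by
  intro n
  induction n with
  | zero =>
    intro xs h out
    have hx : xs = [] := List.eq_nil_of_length_eq_zero (by omega)
    subst hx
    simp [pvChunkIter, pvChunkB]
  | succ m ih =>
    intro xs h out
    cases xs with
    | nil => simp [pvChunkIter, pvChunkB]
    | cons x t =>
      rw [pvChunkIter, pvChunkB, ih (t.drop (k.toNat - 1)) (by simp at h ⊢; omega)]
      simp

-- abstraction of A's loop: no output accumulator, Nat-side tests, "last index" test = "singleton tail"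
def pvGrp {T : Type} (wpl g : Nat) : List (List T) → List T → List T → List (List (List T))
  | _,  _,  [] => []
  | cg, cl, [w] => [cg ++ [cl ++ [w]]]
  | cg, cl, w :: v :: rest =>
    if wpl ≤ cl.length + 1 then
      if g ≤ cg.length + 1 then (cg ++ [cl ++ [w]]) :: pvGrp wpl g [] [] (v :: rest)
      else pvGrp wpl g (cg ++ [cl ++ [w]]) [] (v :: rest)
    else pvGrp wpl g cg (cl ++ [w]) (v :: rest)

-- one-level chunking with an accumulator holding the partial first chunk
def pvCF {T : Type} (k : Nat) : List T → List T → List (List T)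
  | _,   [] => []
  | acc, [w] => [acc ++ [w]]
  | acc, w :: v :: rest =>
    if k ≤ acc.length + 1 then (acc ++ [w]) :: pvCF k [] (v :: rest)
    else pvCF k (acc ++ [w]) (v :: rest)

lemma foldA (nI wplI ml : Int) (h1 : 1 ≤ wplI) :
    ∀ (ys : List (List (String × String))) (s : Int)
      (lg : List (List (List (List (String × String)))))
      (cg : List (List (List (String × String)))) (cl : List (List (String × String))),
      ys ≠ [] → s + (ys.length : Int) = nI →
      ((PySem.List.enumerate ys s).foldl (pvStepA nI wplI ml) (lg, cg, cl)).1
        = lg ++ pvGrp wplI.toNat (max 1 ml).toNat cg cl ys := by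
  intro ys
  induction ys with
  | nil => intro s lg cg cl h _; exact absurd rfl h
  | cons w t ih =>
    intro s lg cg cl _ hs
    cases t with
    | nil =>
      have hs' : s = nI - 1 := by
        simp only [List.length_cons, List.length_nil] at hs; push_cast at hs; omega
      simp [PySem.List.enumerate_cons, PySem.List.enumerate_nil, pvStepA, hs', pvGrp]
    | cons v rest =>
      have hsne : ¬ (s = nI - 1) := by
        simp only [List.length_cons] at hs; push_cast at hs; omega
      have hs2 : (s + 1) + (((v :: rest).length : Nat) : Int) = nI := by
        simp only [List.length_cons] at hs ⊢; push_cast at hs ⊢; omega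
      rw [PySem.List.enumerate_cons]
      simp only [List.foldl_cons]
      by_cases hcl : ((cl.length + 1 : Int) ≥ wplI)
      · by_cases hcg : ((cg.length + 1 : Int) ≥ ml)
        · have hst : pvStepA nI wplI ml (lg, cg, cl) (s, w) = (lg ++ [cg ++ [cl ++ [w]]], [], []) := by
            simp [pvStepA, hcl, hcg]
          rw [hst, ih (s + 1) _ _ _ (by simp) hs2]
          have h1' : wplI.toNat ≤ cl.length + 1 := by omega
          have h2' : (max 1 ml).toNat ≤ cg.length + 1 := by omega
          simp [pvGrp, h1', h2']
        · have hst : pvStepA nI wplI ml (lg, cg, cl) (s, w) = (lg, cg ++ [cl ++ [w]], []) := by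
            simp [pvStepA, hcl, hcg, hsne]
          rw [hst, ih (s + 1) _ _ _ (by simp) hs2]
          have h1' : wplI.toNat ≤ cl.length + 1 := by omega
          have h2' : ¬ ((max 1 ml).toNat ≤ cg.length + 1) := by omega
          simp [pvGrp, h1', h2']
      · have hst : pvStepA nI wplI ml (lg, cg, cl) (s, w) = (lg, cg, cl ++ [w]) := by
          simp [pvStepA, hcl, hsne]
        rw [hst, ih (s + 1) _ _ _ (by simp) hs2]
        have h1' : ¬ (wplI.toNat ≤ cl.length + 1) := by omega
        simp [pvGrp, h1']

lemma pvCF_ne_nil {T : Type} (k : Nat) (acc : List T) (ys : List T) (h : ys ≠ []) :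
    pvCF k acc ys ≠ [] := by
  induction ys generalizing acc with
  | nil => exact absurd rfl h
  | cons w t ih =>
    cases t with
    | nil => simp [pvCF]
    | cons v rest =>
      rw [pvCF]
      split
      · simp
      · exact ih _ (by simp)

-- A's fused loop equals chunking words into lines and then the lines into groups
lemma pvGrp_eq_pvCF {T : Type} (wpl g : Nat) (hw : 0 < wpl) (hg : 0 < g) :
    ∀ (ys : List T) (cl : List T) (cg : List (List T)),
      ys ≠ [] → cl.length < wpl → cg.length < g →
      pvGrp wpl g cg cl ys = pvCF g cg (pvCF wpl cl ys) := by
  intro ys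
  induction ys with
  | nil => intro cl cg h _ _; exact absurd rfl h
  | cons w t ih =>
    intro cl cg _ hcl hcg
    cases t with
    | nil => simp [pvGrp, pvCF]
    | cons v rest =>
      by_cases h1 : wpl ≤ cl.length + 1
      · have hL : pvCF wpl ([] : List T) (v :: rest) ≠ [] := pvCF_ne_nil _ _ _ (by simp)
        obtain ⟨l0, L', hL'⟩ := List.exists_cons_of_ne_nil hL
        by_cases h2 : g ≤ cg.length + 1
        · rw [pvGrp, if_pos h1, if_pos h2, pvCF, if_pos h1,
              ih [] [] (by simp) hw hg, hL', pvCF, if_pos h2, ← hL']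
        · rw [pvGrp, if_pos h1, if_neg h2, pvCF, if_pos h1,
              ih [] (cg ++ [cl ++ [w]]) (by simp) hw (by simp; omega), hL', pvCF, if_neg h2, ← hL']
      · rw [pvGrp, if_neg h1, pvCF, if_neg h1,
            ih (cl ++ [w]) cg (by simp) (by simp; omega) hcg]

-- one unfolding of pvChunkB on a nonempty list, in take/drop form
lemma chunkB_cons {T : Type} (kI : Int) (hk : 1 ≤ kI) (x : T) (xs : List T) :
    pvChunkB kI (x :: xs) = (x :: xs).take kI.toNat :: pvChunkB kI ((x :: xs).drop kI.toNat) := by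
  rw [pvChunkB]
  have h2 : kI.toNat = (kI.toNat - 1) + 1 := by omega
  congr 2
  · rw [← List.take_succ_cons, ← h2]
  · rw [← List.drop_succ_cons, ← h2]

-- accumulator chunking equals B's take/drop chunking
lemma pvCF_eq_chunk {T : Type} (kI : Int) (hk : 1 ≤ kI) :
    ∀ (ys : List T) (acc : List T),
      ys ≠ [] → acc.length < kI.toNat →
      pvCF kI.toNat acc ys
        = (acc ++ ys.take (kI.toNat - acc.length)) :: pvChunkB kI (ys.drop (kI.toNat - acc.length)) := by
  intro ys
  induction ys with
  | nil => intro acc h _; exact absurd rfl h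
  | cons w t ih =>
    intro acc _ hacc
    cases t with
    | nil =>
      have h1 : kI.toNat - acc.length = (kI.toNat - acc.length - 1) + 1 := by omega
      rw [pvCF, h1]
      simp only [List.take_succ_cons, List.take_nil, List.drop_succ_cons, List.drop_nil]
      rw [pvChunkB]
    | cons v rest =>
      by_cases h1 : kI.toNat ≤ acc.length + 1
      · have hlen : kI.toNat - acc.length = 1 := by omega
        rw [pvCF, if_pos h1, ih [] (by simp) (by simp; omega), hlen]
        simp only [List.nil_append, List.length_nil, Nat.sub_zero, List.take_succ_cons,
          List.take_zero, List.drop_succ_cons, List.drop_zero]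
        rw [← chunkB_cons kI hk]
      · rw [pvCF, if_neg h1, ih (acc ++ [w]) (by simp) (by simp; omega)]
        have h2 : kI.toNat - acc.length = (kI.toNat - (acc ++ [w]).length) + 1 := by simp; omega
        rw [h2]
        simp [List.take_succ_cons, List.drop_succ_cons]

lemma pvCF_nil_eq_chunk {T : Type} (kI : Int) (hk : 1 ≤ kI) (ys : List T) (h : ys ≠ []) :
    pvCF kI.toNat [] ys = pvChunkB kI ys := by
  obtain ⟨y, t, rfl⟩ := List.exists_cons_of_ne_nil h
  rw [pvCF_eq_chunk kI hk _ [] (List.cons_ne_nil _ _) (by simp only [List.length_nil]; omega), chunkB_cons kI hk]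
  simp

-- ===== VERDICT (by name: the statement is the Claim_ definition above) =====
theorem create_line_groups_spec : Claim_equal_create_line_groups := by
  intro words max_lines _ _
  unfold Spec_create_line_groups create_line_groups create_line_groups_alt
  by_cases hw : words = []
  · simp [hw]
  · simp only [if_neg hw]
    set wplI : Int := max 1 (PySem.Int.floordiv (words.length : Int) max_lines) with hwpl
    have h1 : 1 ≤ wplI := le_max_left _ _
    have hgI : (1 : Int) ≤ max 1 max_lines := le_max_left _ _
    rw [foldA (words.length : Int) wplI max_lines h1 words 0 [] [] [] hw (by simp)]
    rw [pvGrp_eq_pvCF wplI.toNat (max 1 max_lines).toNat (by omega) (by omega) words [] [] hw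
        (by simp only [List.length_nil]; omega) (by simp only [List.length_nil]; omega)]
    rw [pvCF_nil_eq_chunk wplI h1 words hw]
    have hne : pvChunkB wplI words ≠ [] := by
      obtain ⟨y, t, rfl⟩ := List.exists_cons_of_ne_nil hw
      rw [chunkB_cons wplI h1]; simp
    rw [pvCF_nil_eq_chunk (max 1 max_lines) hgI _ hne]
    rw [pvChunkIter_eq _ wplI words.length words le_rfl []]
    simp only [List.nil_append]
    rw [pvChunkIter_eq _ (max 1 max_lines) (pvChunkB wplI words).length _ le_rfl []]
    simp
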